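-- pv_equiv track=rewrite | github.com/gthcon/streaming-log-compression | test_logs/drain_lossless.py | get_line_delta
-- ===== SOURCE A (Python) =====
-- def get_line_delta(template, line):
--     """Extract variables from line using template.
--     Returns (success, variables) tuple.
--     If template doesn't match, returns (False, [line])."""
--     parts = template.split('<*>')
--     if len(parts) == 1:
--         if template == line:
--             return (True, [])
--         else:
--             return (False, [line])  # Line doesn't match template
--
--     variables = []
--     remaining = line
--     for part in parts:
--         if not part:
--             continue
--         idx = remaining.find(part)
--         if idx == -1:
--             # Template doesn't match - return whole line
--             return (False, [line])
--         if idx > 0: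
--             variables.append(remaining[:idx])
--         remaining = remaining[idx + len(part):]
--     if remaining:
--         variables.append(remaining)
--
--     return (True, variables)
-- ===== SOURCE B (Python) =====
-- def get_line_delta(template, line):
--     """Extract variables from line using template.
--     Two staged passes: first record the absolute (start, end) spans of each
--     matched literal with line.find(lit, pos), then read the variables off as
--     the gaps between consecutive spans in the original line."""
--     parts = template.split('<*>')
--     if len(parts) == 1:
--         return (True, []) if template == line else (False, [line])
--     cuts = []
--     pos = 0
--     for lit in parts:
--         if not lit:
--             continue
--         i = line.find(lit, pos)
--         if i == -1:
--             return (False, [line])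
--         cuts.append((i, i + len(lit)))
--         pos = i + len(lit)
--     starts = [0] + [e for (_, e) in cuts]
--     ends = [s for (s, _) in cuts] + [len(line)]
--     variables = [line[a:b] for a, b in zip(starts, ends) if line[a:b]]
--     return (True, variables)
-- ===== Notes on version B (the rewrite author's own statement) =====
-- stated objective: alternative
-- what changed: Replaces A's single pass over a shrinking 'remaining' suffix that appends variable strings as it goes with two staged passes: first an integer-cursor scan (line.find(lit, pos)) recording only the absolute (start, end) spans of the matched literals, then the variables read off as the gaps between consecutive spans via zip over the original line.
import Mathlib
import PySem

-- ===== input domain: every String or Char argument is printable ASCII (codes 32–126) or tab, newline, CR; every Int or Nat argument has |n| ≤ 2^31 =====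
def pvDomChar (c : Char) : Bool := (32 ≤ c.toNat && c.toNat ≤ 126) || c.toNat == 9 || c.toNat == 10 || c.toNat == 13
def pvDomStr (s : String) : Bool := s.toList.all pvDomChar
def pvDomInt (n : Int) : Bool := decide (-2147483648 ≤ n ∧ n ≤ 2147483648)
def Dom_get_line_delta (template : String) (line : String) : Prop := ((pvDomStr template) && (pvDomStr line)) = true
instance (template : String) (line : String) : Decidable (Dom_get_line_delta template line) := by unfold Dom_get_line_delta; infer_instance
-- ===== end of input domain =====

-- B replaces A's shrinking-suffix pass that appends variable strings as it goes with two staged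
-- passes: an integer-cursor scan recording only the (start, end) spans of the matched literals,
-- then the variables read off as the gaps between consecutive spans; objective: alternative.

-- ===== PORT A =====
-- the for-loop over parts: state (variables, remaining); 'return (False, [line])' encoded as none
def pvALoop (parts : List (List Char)) (vars : List (List Char)) (remaining : List Char) :
    Option (List (List Char)) :=
  match parts with
  | [] => if remaining ≠ [] then some (vars ++ [remaining]) else some vars
  | p :: ps =>
      if p = [] then pvALoop ps vars remaining          -- if not part: continue
      else
        let idx := PySem.Chars.find remaining p
        if idx = -1 then none                            -- template doesn't match
        else
          pvALoop ps
            (if 0 < idx then vars ++ [PySem.Chars.slice remaining none (some idx)] else vars)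
            (PySem.Chars.slice remaining (some (idx + (p.length : Int))) none)

def get_line_delta (template : String) (line : String) : Bool × List String :=
  let parts := PySem.Chars.splitOn template.toList ['<', '*', '>']
  if parts.length = 1 then
    if template = line then (true, []) else (false, [line])
  else
    match pvALoop parts [] line.toList with
    | none => (false, [line])
    | some vars => (true, vars.map String.ofList)

-- ===== PORT B =====
-- first pass of Source B: cursor pos, collecting the absolute spans (i, i + len(lit)) of the
-- matched literals; 'return (False, [line])' encoded as none
def pvCuts (parts : List (List Char)) (pos : Int) (line : List Char) :
    Option (List (Int × Int)) :=
  match parts with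
  | [] => some []
  | lit :: ps =>
      if lit = [] then pvCuts ps pos line               -- if not lit: continue
      else
        let i := PySem.Chars.findFrom line lit pos none  -- line.find(lit, pos)
        if i = -1 then none
        else (pvCuts ps (i + (lit.length : Int)) line).map
               (fun cs => (i, i + (lit.length : Int)) :: cs)

def get_line_delta_alt (template : String) (line : String) : Bool × List String :=
  let parts := PySem.Chars.splitOn template.toList ['<', '*', '>']
  if parts.length = 1 then
    if template = line then (true, []) else (false, [line])
  else
    match pvCuts parts 0 line.toList with
    | none => (false, [line])
    | some cuts =>
        let starts := (0 : Int) :: cuts.map Prod.snd          -- [0] + [e for (_, e) in cuts]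
        let ends := cuts.map Prod.fst ++ [(line.toList.length : Int)]  -- [s ...] + [len(line)]
        (true, (((starts.zip ends).map
                  (fun ab => PySem.List.slice line.toList (some ab.1) (some ab.2))).filter
                  (· ≠ [])).map String.ofList)              -- [line[a:b] ... if line[a:b]]

-- ===== PRECONDITION & SPEC =====
def Spec_get_line_delta (template : String) (line : String) (out : Bool × List String) : Prop := out = get_line_delta_alt template line
instance (template : String) (line : String) (out : Bool × List String) : Decidable (Spec_get_line_delta template line out) := by unfold Spec_get_line_delta; infer_instance

-- ===== CLAIM (what is proved, stated in full; the proofs are below) =====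
def Claim_equal_get_line_delta : Prop := ∀ (template : String) (line : String), Dom_get_line_delta template line → Spec_get_line_delta template line (get_line_delta template line)

-- ===== LEMMAS AND PROOFS =====

-- proof-side view of B's gap extraction: the slices between consecutive spans
def pvGapsI (line : List Char) (pos : Int) (cuts : List (Int × Int)) : List (List Char) :=
  match cuts with
  | [] => [PySem.List.slice line (some pos) (some (line.length : Int))]
  | (s, e) :: cs => PySem.List.slice line (some pos) (some s) :: pvGapsI line e cs

-- B's zip over (starts, ends) computes exactly the consecutive gaps
theorem pvZip_eq_gaps (line : List Char) (pos : Int) (cuts : List (Int × Int)) :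
    ((pos :: cuts.map Prod.snd).zip (cuts.map Prod.fst ++ [(line.length : Int)])).map
      (fun ab => PySem.List.slice line (some ab.1) (some ab.2)) = pvGapsI line pos cuts := by
  induction cuts generalizing pos with
  | nil => simp [pvGapsI]
  | cons c cs ih => cases c with
      | mk s e => simpa [pvGapsI, List.zip_cons_cons] using ih e

-- A's shrinking-suffix loop equals B's span scan followed by gap extraction and the filter
theorem pvLoop_eq (parts : List (List Char)) (line : List Char) (pos : Nat)
    (hpos : pos ≤ line.length) (vars : List (List Char)) :
    pvALoop parts vars (line.drop pos) =
      (pvCuts parts (pos : Int) line).map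
        (fun cs => vars ++ (pvGapsI line (pos : Int) cs).filter (· ≠ [])) := by
  induction parts generalizing pos vars with
  | nil =>
      simp only [pvALoop, pvCuts, Option.map_some, pvGapsI]
      have htail : PySem.List.slice line (some (pos : Int)) (some (line.length : Int)) =
          line.drop pos := by
        rw [PySem.List.slice_natCast]
        exact List.take_of_length_le (by simp)
      rw [htail]
      by_cases h : line.drop pos = [] <;> simp [h, List.filter]
  | cons p ps ih =>
      by_cases hp : p = []
      · subst hp
        simp only [pvALoop, pvCuts, if_pos rfl]
        exact ih pos hpos vars
      · simp only [pvALoop, pvCuts, if_neg hp, PySem.Chars.slice_eq_listSlice]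
        have hff := PySem.Chars.findFrom_natCast line p pos hpos
        set idx := PySem.Chars.find (line.drop pos) p with hidx
        by_cases hneg : idx = -1
        · simp [hff, hneg]
        · have h0 : 0 ≤ idx := by
            have := PySem.Chars.neg_one_le_find (line.drop pos) p
            omega
          have hi : PySem.Chars.findFrom line p (↑pos) none = (pos : Int) + idx := by
            rw [hff]; simp [hneg]
          have hpref : p <+: (line.drop pos).drop idx.toNat := (PySem.Chars.find_spec h0).1
          have hplen : 0 < p.length := List.length_pos_iff.mpr hp
          have hlen : idx.toNat + p.length ≤ line.length - pos := by
            have := hpref.length_le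
            simp at this
            omega
          -- the new remaining suffix is the original line from the new cursor on
          have hrem : PySem.List.slice (line.drop pos) (some (idx + (p.length : Int))) none =
              line.drop (pos + idx.toNat + p.length) := by
            rw [PySem.List.slice_from _ (by omega), List.drop_drop]
            congr 1
            omega
          -- the variable A cuts out of 'remaining' is B's gap slice of the whole line
          have hgap : PySem.List.slice (line.drop pos) none (some idx) =
              PySem.List.slice line (some (pos : Int)) (some ((pos : Int) + idx)) := by
            rw [PySem.List.slice_to _ h0, PySem.List.slice_toNat _ (by omega) (by omega)]
            have e2 : ((pos : Int) + idx).toNat - pos = idx.toNat := by omega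
            rw [Int.toNat_natCast, e2]
          have hgaplen : (PySem.List.slice (line.drop pos) none (some idx)).length
              = idx.toNat := by
            rw [PySem.List.slice_to _ h0]
            simp
            omega
          have hcast : (((pos + idx.toNat + p.length : Nat)) : Int) =
              (pos : Int) + idx + (p.length : Int) := by
            push_cast [Int.toNat_of_nonneg h0]
            ring
          have hy : ¬ ((pos : Int) + idx = -1) := by omega
          simp only [if_neg hneg, hi, if_neg hy]
          rw [hrem, ih (pos + idx.toNat + p.length) (by omega), hcast]
          cases hc : pvCuts ps ((pos : Int) + idx + (p.length : Int)) line with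
          | none => simp
          | some cs =>
              simp only [Option.map_some, pvGapsI, List.filter_cons]
              rw [← hgap]
              by_cases hz : 0 < idx
              · have hne : PySem.List.slice (line.drop pos) none (some idx) ≠ [] := by
                  intro h
                  rw [h] at hgaplen
                  simp at hgaplen
                  omega
                simp [hz, hne, List.append_assoc]
              · have hz0 : idx = 0 := by omega
                have he : PySem.List.slice (line.drop pos) none (some idx) = [] := by
                  rw [hz0, PySem.List.slice_to _ le_rfl]
                  simp
                simp [hz, he]

-- ===== VERDICT (by name: the statement is the Claim_ definition above) =====
theorem get_line_delta_spec : Claim_equal_get_line_delta := by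
  intro template line _
  unfold Spec_get_line_delta get_line_delta get_line_delta_alt
  by_cases h1 : (PySem.Chars.splitOn template.toList ['<', '*', '>']).length = 1
  · simp [h1]
  · simp only [h1, if_false]
    have := pvLoop_eq (PySem.Chars.splitOn template.toList ['<', '*', '>']) line.toList 0
      (by simp) []
    simp only [List.drop_zero, Nat.cast_zero] at this
    rw [this]
    cases hc : pvCuts (PySem.Chars.splitOn template.toList ['<', '*', '>']) 0 line.toList with
    | none => simp
    | some cs =>
        simp only [Option.map_some]
        rw [pvZip_eq_gaps]
        simp
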